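-- pv_equiv track=rewrite | github.com/NRomanLee/Test-Task-for-PL | task1/task1.py | circular_array_path
-- ===== SOURCE A (Python) =====
-- def circular_array_path(n, m):
--     path = []
--     position = 0
--
--     while True:
--         path.append(position + 1)
--         position = (position + m - 1) % n
--         if position == 0:
--             break
--
--     return path
-- ===== SOURCE B (Python) =====
-- def circular_array_path(n, m):
--     # closed form: step s = (m-1) % n, cycle length L = |n| / gcd(|n|, |s|),
--     # element k is (k*(m-1)) % n + 1
--     s = (m - 1) % n
--     a, b = abs(n), abs(s)
--     while b:
--         a, b = b, a % b
--     L = abs(n) // a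
--     return [k * (m - 1) % n + 1 for k in range(L)]
-- ===== Notes on version B (the rewrite author's own statement) =====
-- stated objective: alternative
-- what changed: Replaces the stateful step-until-back-to-zero while loop with a precomputed cycle length |n|/gcd(|n|,(m-1)%n) (Euclid) and a closed-form comprehension emitting k*(m-1)%n+1.
import Mathlib
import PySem

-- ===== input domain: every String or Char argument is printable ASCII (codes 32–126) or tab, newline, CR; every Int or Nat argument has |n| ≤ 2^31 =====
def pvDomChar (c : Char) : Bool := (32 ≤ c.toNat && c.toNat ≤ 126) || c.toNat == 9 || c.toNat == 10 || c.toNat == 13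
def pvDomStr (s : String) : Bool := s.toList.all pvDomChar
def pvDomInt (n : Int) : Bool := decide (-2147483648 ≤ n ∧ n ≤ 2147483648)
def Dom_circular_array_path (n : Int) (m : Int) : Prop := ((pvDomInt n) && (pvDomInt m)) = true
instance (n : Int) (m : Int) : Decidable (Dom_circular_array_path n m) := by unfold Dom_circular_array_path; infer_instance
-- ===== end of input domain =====

-- B replaces A's stateful step-until-back-to-zero loop by a precomputed cycle length
-- |n|/gcd(|n|,(m-1)%n) and a closed-form comprehension (alternative decomposition, same cost).


-- ===== PORT A =====
-- A's 'while True' loop; fuel = |n| only makes the recursion total (the loop runs at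
-- most |n| iterations whenever n ≠ 0, which Pre_ guarantees).
def pvLoopA (n : Int) (m : Int) : Nat → Int → List Int → List Int
  | 0, _, acc => acc.reverse
  | fuel+1, pos, acc =>
      let acc' := (pos + 1) :: acc
      let pos' := PySem.Int.mod (pos + m - 1) n
      if pos' = 0 then acc'.reverse else pvLoopA n m fuel pos' acc'

def circular_array_path (n : Int) (m : Int) : List Int :=
  pvLoopA n m n.natAbs 0 []

-- ===== PORT B =====
-- Source B's hand-written Euclid loop 'while b: a, b = b, a % b' on absolute values
def pvGcd : Nat → Nat → Nat
  | a, 0 => a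
  | a, b+1 => pvGcd (b+1) (a % (b+1))
  termination_by _ b => b
  decreasing_by exact Nat.lt_succ_of_le (Nat.le_of_lt_succ (Nat.mod_lt _ (Nat.succ_pos _)))

def circular_array_path_alt (n : Int) (m : Int) : List Int :=
  let s := PySem.Int.mod (m - 1) n
  let g := pvGcd n.natAbs s.natAbs
  let L := PySem.Int.floordiv (n.natAbs : Int) (g : Int)
  (PySem.List.pyRange 0 L 1).map (fun k => PySem.Int.mod (k * (m - 1)) n + 1)

-- ===== PRECONDITION & SPEC =====
-- Pre_ excludes exactly n = 0, where A raises ZeroDivisionError on '% n'.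
def Pre_circular_array_path (n : Int) (m : Int) : Prop := n ≠ 0
instance (n : Int) (m : Int) : Decidable (Pre_circular_array_path n m) := by
  unfold Pre_circular_array_path; infer_instance

def pvWitness_circular_array_path : Int × Int := (5, 3)

def Spec_circular_array_path (n : Int) (m : Int) (out : List Int) : Prop := out = circular_array_path_alt n m
instance (n : Int) (m : Int) (out : List Int) : Decidable (Spec_circular_array_path n m out) := by unfold Spec_circular_array_path; infer_instance

-- ===== CLAIM (what is proved, stated in full; the proofs are below) =====
def Claim_equal_circular_array_path : Prop := ∀ (n : Int) (m : Int), Dom_circular_array_path n m → Pre_circular_array_path n m → Spec_circular_array_path n m (circular_array_path n m)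

-- ===== LEMMAS AND PROOFS =====

theorem pvGcd_eq_gcd (b : Nat) : ∀ a, pvGcd a b = Nat.gcd a b := by
  induction b using Nat.strong_induction_on with
  | _ b ih =>
    intro a
    match b with
    | 0 => simp [pvGcd]
    | b+1 =>
      rw [pvGcd, ih (a % (b+1)) (Nat.mod_lt _ (Nat.succ_pos _))]
      conv_rhs => rw [Nat.gcd_comm, Nat.gcd_rec]
      exact Nat.gcd_comm _ _

theorem pv_mod_step (n q p : Int) (j : Nat) (hp : p = PySem.Int.mod ((j : Int) * q) n) :
    PySem.Int.mod (p + q) n = PySem.Int.mod (((j+1 : Nat) : Int) * q) n := by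
  subst hp
  show ((((j : Int) * q).fmod n) + q).fmod n = (((j+1 : Nat) : Int) * q).fmod n
  rw [Int.fmod_add_fmod]
  congr 1
  push_cast
  ring

theorem pv_dvd_iff (n q : Int) (k : Nat) :
    n ∣ (k : Int) * q ↔ n.natAbs ∣ k * q.natAbs := by
  rw [← Int.natAbs_dvd_natAbs, Int.natAbs_mul, Int.natAbs_natCast]

-- the loop characterization: starting at position (j*q) % n with L-j iterations left
theorem pv_loopA_eq (n m : Int) (L : Nat)
    (hLdvd : n ∣ (L : Int) * (m-1))
    (hLmin : ∀ k : Nat, 0 < k → k < L → ¬ n ∣ (k : Int) * (m-1)) :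
    ∀ fuel j acc, j < L → L - j ≤ fuel →
      pvLoopA n m fuel (PySem.Int.mod ((j : Int) * (m-1)) n) acc
        = acc.reverse ++ (List.range (L-j)).map
            (fun i => PySem.Int.mod (((j+i : Nat) : Int) * (m-1)) n + 1) := by
  intro fuel
  induction fuel with
  | zero => intro j acc hj hf; omega
  | succ fuel ih =>
    intro j acc hj hf
    rw [pvLoopA]
    have hstep : PySem.Int.mod (PySem.Int.mod ((j : Int) * (m-1)) n + m - 1) n
        = PySem.Int.mod (((j+1 : Nat) : Int) * (m-1)) n := by
      have := pv_mod_step n (m-1) (PySem.Int.mod ((j : Int) * (m-1)) n) j rfl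
      rw [← this]; ring_nf
    simp only [hstep]
    by_cases hz : PySem.Int.mod (((j+1 : Nat) : Int) * (m-1)) n = 0
    · rw [if_pos hz]
      have hdvd : n ∣ ((j+1 : Nat) : Int) * (m-1) :=
        (PySem.Int.mod_eq_zero_iff_dvd _ _).mp hz
      have hjL : j + 1 = L := by
        by_contra hne
        exact hLmin (j+1) (Nat.succ_pos _) (by omega) hdvd
      have : L - j = 1 := by omega
      simp [this, List.range_succ]
    · rw [if_neg hz]
      have hjL : j + 1 < L := by
        rcases Nat.lt_or_ge (j+1) L with h | h
        · exact h
        · have : j + 1 = L := by omega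
          rw [this] at hz
          exact absurd ((PySem.Int.mod_eq_zero_iff_dvd _ _).mpr hLdvd) hz
      have := ih (j+1) ((PySem.Int.mod ((j : Int) * (m-1)) n + 1) :: acc) hjL (by omega)
      rw [this]
      have hrange : L - j = (L - (j+1)) + 1 := by omega
      rw [hrange, List.range_succ_eq_map, List.map_cons, List.map_map,
          List.reverse_cons, List.append_assoc]
      congr 1
      simp only [List.singleton_append, Nat.add_zero]
      congr 1
      apply List.map_congr_left
      intro i _
      simp only [Function.comp_apply]
      congr 2
      push_cast
      ring

-- number theory for L = a / gcd a qn
theorem pv_L_pos (a qn : Nat) (ha : 0 < a) : 0 < a / Nat.gcd a qn :=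
  Nat.div_pos (Nat.le_of_dvd ha (Nat.gcd_dvd_left a qn)) (Nat.gcd_pos_of_pos_left qn ha)

theorem pv_L_dvd (a qn : Nat) : a ∣ (a / Nat.gcd a qn) * qn := by
  rcases Nat.eq_zero_or_pos a with rfl | ha
  · simp
  have hg : 0 < Nat.gcd a qn := Nat.gcd_pos_of_pos_left qn ha
  obtain ⟨a', ha'⟩ := Nat.gcd_dvd_left a qn
  obtain ⟨q', hq'⟩ := Nat.gcd_dvd_right a qn
  have hdivg : a / Nat.gcd a qn = a' := Nat.div_eq_of_eq_mul_right hg ha'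
  rw [hdivg]
  refine ⟨q', ?_⟩
  rw [hq']
  conv_rhs => rw [ha']
  ring

theorem pv_L_min (a qn k : Nat) (ha : 0 < a) (hk : 0 < k) (hkL : k < a / Nat.gcd a qn) :
    ¬ a ∣ k * qn := by
  intro hdvd
  have hg : 0 < Nat.gcd a qn := Nat.gcd_pos_of_pos_left qn ha
  set g := Nat.gcd a qn with hgdef
  have ha' : a = g * (a / g) := (Nat.mul_div_cancel' (Nat.gcd_dvd_left a qn)).symm
  have hq' : qn = g * (qn / g) := (Nat.mul_div_cancel' (Nat.gcd_dvd_right a qn)).symm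
  have hco : Nat.Coprime (a / g) (qn / g) := Nat.coprime_div_gcd_div_gcd hg
  have hdvd' : (a / g) ∣ k * (qn / g) := by
    have hkq : k * qn = g * (k * (qn / g)) := by
      conv_lhs => rw [hq']
      ring
    have : g * (a / g) ∣ g * (k * (qn / g)) := by
      rw [← ha', ← hkq]
      exact hdvd
    exact (Nat.mul_dvd_mul_iff_left hg).mp this
  have : (a / g) ∣ k := (Nat.Coprime.dvd_of_dvd_mul_right hco) hdvd'
  have := Nat.le_of_dvd hk this
  omega

theorem pv_gcd_shift (n q : Int) :
    Nat.gcd n.natAbs (PySem.Int.mod q n).natAbs = Nat.gcd n.natAbs q.natAbs := by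
  show Int.gcd n (q.fmod n) = Int.gcd n q
  have h : q.fmod n = q + (-(q.fdiv n)) * n := by rw [Int.fmod_def]; ring
  rw [h, Int.gcd_add_mul_right_right]

-- ===== VERDICT (by name: the statement is the Claim_ definition above) =====
theorem circular_array_path_spec : Claim_equal_circular_array_path := by
  intro n m _ hn
  have ha : 0 < n.natAbs := Int.natAbs_pos.mpr hn
  set a := n.natAbs with hadef
  set qn := (m-1).natAbs with hqdef
  set L := a / Nat.gcd a qn with hLdef
  have hLdvd : n ∣ (L : Int) * (m-1) := by
    rw [pv_dvd_iff]; exact pv_L_dvd a qn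
  have hLmin : ∀ k : Nat, 0 < k → k < L → ¬ n ∣ (k : Int) * (m-1) := by
    intro k hk hkL h
    exact pv_L_min a qn k ha hk hkL ((pv_dvd_iff n (m-1) k).mp h)
  have hL1 : 0 < L := pv_L_pos a qn ha
  have hLa : L ≤ a := Nat.div_le_self _ _
  -- A's loop produces the closed-form list
  have hA : circular_array_path n m
      = (List.range L).map (fun i : Nat => PySem.Int.mod ((i : Int) * (m-1)) n + 1) := by
    unfold circular_array_path
    have h0 : pvLoopA n m a 0 []
        = pvLoopA n m a (PySem.Int.mod (((0 : Nat) : Int) * (m-1)) n) [] := by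
      simp [PySem.Int.mod]
    rw [h0, pv_loopA_eq n m L hLdvd hLmin a 0 [] hL1 (by omega)]
    simp only [List.reverse_nil, List.nil_append, Nat.sub_zero, Nat.zero_add]
  -- B computes the same closed form
  have hB : circular_array_path_alt n m
      = (List.range L).map (fun i : Nat => PySem.Int.mod ((i : Int) * (m-1)) n + 1) := by
    unfold circular_array_path_alt
    simp only []
    rw [pvGcd_eq_gcd, pv_gcd_shift, ← hqdef, ← hadef, PySem.Int.floordiv_natCast, ← hLdef,
        PySem.List.pyRange_one]
    rw [List.map_map]
    have hT : ((L : Int) - 0).toNat = L := by omega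
    rw [hT]
    apply List.map_congr_left
    intro i _
    simp only [Function.comp_apply]
    congr 2
    ring
  show Spec_circular_array_path n m (circular_array_path n m)
  unfold Spec_circular_array_path
  rw [hA, hB]
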